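-- pv_equiv track=rewrite | github.com/lechatreveur/FungalProjectScript | SingleCellQuantificationHPC/xcorr_utils.py | _union_many_bboxes
-- ===== SOURCE A (Python) =====
-- def _union_many_bboxes(bboxes, H, W, pad=0):
--     if not bboxes:
--         return 0, H, 0, W
--     r0 = max(0, min(b[0] for b in bboxes) - pad)
--     r1 = min(H, max(b[1] for b in bboxes) + pad)
--     c0 = max(0, min(b[2] for b in bboxes) - pad)
--     c1 = min(W, max(b[3] for b in bboxes) + pad)
--     return int(r0), int(r1), int(c0), int(c1)
-- ===== SOURCE B (Python) =====
-- def _union_many_bboxes(bboxes, H, W, pad=0):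
--     if not bboxes:
--         return 0, H, 0, W
--     # Clamp/pad each box at the leaves, then union clamped boxes by
--     # divide-and-conquer; correct since max(0,.) and min(H,.) are monotone.
--     def go(lo, hi):
--         if hi - lo == 1:
--             b = bboxes[lo]
--             return (max(0, b[0] - pad), min(H, b[1] + pad),
--                     max(0, b[2] - pad), min(W, b[3] + pad))
--         mid = (lo + hi) // 2
--         u = go(lo, mid)
--         v = go(mid, hi)
--         return (min(u[0], v[0]), max(u[1], v[1]),
--                 min(u[2], v[2]), max(u[3], v[3]))
--     r0, r1, c0, c1 = go(0, len(bboxes))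
--     return int(r0), int(r1), int(c0), int(c1)
-- ===== Notes on version B (the rewrite author's own statement) =====
-- stated objective: alternative
-- what changed: Instead of four global min/max reductions followed by one clamp, B pads and clamps every box at the leaves and unions already-clamped boxes by divide-and-conquer over index halves (correct because max(0,.) and min(H,.) are monotone, so clamping commutes with min/max).
import Mathlib
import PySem

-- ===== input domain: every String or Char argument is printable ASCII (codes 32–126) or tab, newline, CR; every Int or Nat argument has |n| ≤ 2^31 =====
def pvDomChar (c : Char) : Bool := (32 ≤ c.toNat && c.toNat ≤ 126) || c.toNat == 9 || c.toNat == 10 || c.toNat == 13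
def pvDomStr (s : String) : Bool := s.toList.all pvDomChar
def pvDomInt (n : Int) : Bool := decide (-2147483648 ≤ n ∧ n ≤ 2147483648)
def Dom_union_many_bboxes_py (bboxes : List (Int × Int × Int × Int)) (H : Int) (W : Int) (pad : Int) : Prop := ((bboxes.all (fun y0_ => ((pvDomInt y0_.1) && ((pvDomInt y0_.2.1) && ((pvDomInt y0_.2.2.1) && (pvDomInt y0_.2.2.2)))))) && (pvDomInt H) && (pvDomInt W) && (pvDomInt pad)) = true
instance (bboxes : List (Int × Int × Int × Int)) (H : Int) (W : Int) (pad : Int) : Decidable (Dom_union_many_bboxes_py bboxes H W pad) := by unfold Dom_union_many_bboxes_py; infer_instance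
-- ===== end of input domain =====

-- B pads/clamps each box at the leaves and unions clamped boxes by divide-and-conquer, instead of A's four global min/max scans followed by one clamp; same return value.


-- ===== PORT A =====
-- Python's min(gen)/max(gen) on a nonempty sequence: left fold of binary min/max from the first element.
def pyMinBy (f : (Int × Int × Int × Int) → Int) : List (Int × Int × Int × Int) → Int
  | [] => 0   -- unreachable: A only calls this on nonempty lists
  | b :: bs => bs.foldl (fun m x => min m (f x)) (f b)

def pyMaxBy (f : (Int × Int × Int × Int) → Int) : List (Int × Int × Int × Int) → Int
  | [] => 0   -- unreachable
  | b :: bs => bs.foldl (fun m x => max m (f x)) (f b)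

def union_many_bboxes_py (bboxes : List (Int × Int × Int × Int)) (H : Int) (W : Int) (pad : Int) : Int × Int × Int × Int :=
  if bboxes = [] then (0, H, 0, W)
  else
    let r0 := max 0 (pyMinBy (fun b => b.1) bboxes - pad)
    let r1 := min H (pyMaxBy (fun b => b.2.1) bboxes + pad)
    let c0 := max 0 (pyMinBy (fun b => b.2.2.1) bboxes - pad)
    let c1 := min W (pyMaxBy (fun b => b.2.2.2) bboxes + pad)
    (r0, r1, c0, c1)

-- ===== PORT B =====
-- Source B's inner `go(lo, hi)`: clamp the single box at a leaf, union two halves at a node.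
def goB (bboxes : List (Int × Int × Int × Int)) (H : Int) (W : Int) (pad : Int) (lo hi : Nat) : Int × Int × Int × Int :=
  if hi - lo = 1 then
    let b := bboxes.getD lo (0, 0, 0, 0)   -- lo is always in range on the calls Source B makes
    (max 0 (b.1 - pad), min H (b.2.1 + pad), max 0 (b.2.2.1 - pad), min W (b.2.2.2 + pad))
  else if _h : lo + 1 < hi then
    let mid := (lo + hi) / 2
    let u := goB bboxes H W pad lo mid
    let v := goB bboxes H W pad mid hi
    (min u.1 v.1, max u.2.1 v.2.1, min u.2.2.1 v.2.2.1, max u.2.2.2 v.2.2.2)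
  else (0, H, 0, W)   -- unreachable totality guard: Source B keeps hi - lo ≥ 1
termination_by hi - lo
decreasing_by all_goals omega

def union_many_bboxes_py_alt (bboxes : List (Int × Int × Int × Int)) (H : Int) (W : Int) (pad : Int) : Int × Int × Int × Int :=
  if bboxes = [] then (0, H, 0, W)
  else goB bboxes H W pad 0 bboxes.length

-- ===== PRECONDITION & SPEC =====
def Spec_union_many_bboxes_py (bboxes : List (Int × Int × Int × Int)) (H : Int) (W : Int) (pad : Int) (out : Int × Int × Int × Int) : Prop := out = union_many_bboxes_py_alt bboxes H W pad
instance (bboxes : List (Int × Int × Int × Int)) (H : Int) (W : Int) (pad : Int) (out : Int × Int × Int × Int) : Decidable (Spec_union_many_bboxes_py bboxes H W pad out) := by unfold Spec_union_many_bboxes_py; infer_instance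

-- ===== CLAIM (what is proved, stated in full; the proofs are below) =====
def Claim_equal_union_many_bboxes_py : Prop := ∀ (bboxes : List (Int × Int × Int × Int)) (H : Int) (W : Int) (pad : Int), Dom_union_many_bboxes_py bboxes H W pad → Spec_union_many_bboxes_py bboxes H W pad (union_many_bboxes_py bboxes H W pad)

-- ===== LEMMAS AND PROOFS =====
theorem foldl_op_init (op : Int → Int → Int) (hassoc : ∀ a b c, op (op a b) c = op a (op b c))
    (f : (Int × Int × Int × Int) → Int) :
    ∀ (l : List (Int × Int × Int × Int)) (a b : Int),
      l.foldl (fun m x => op m (f x)) (op a b) = op a (l.foldl (fun m x => op m (f x)) b) := by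
  intro l
  induction l with
  | nil => intro a b; rfl
  | cons c cs ih => intro a b; simp only [List.foldl, hassoc]; exact ih a (op b (f c))

theorem pyMinBy_append (f : (Int × Int × Int × Int) → Int) (l1 l2 : List (Int × Int × Int × Int))
    (h1 : l1 ≠ []) (h2 : l2 ≠ []) :
    pyMinBy f (l1 ++ l2) = min (pyMinBy f l1) (pyMinBy f l2) := by
  cases l1 with
  | nil => exact absurd rfl h1
  | cons b bs =>
    cases l2 with
    | nil => exact absurd rfl h2
    | cons c cs =>
      simp only [pyMinBy, List.cons_append, List.foldl_append, List.foldl]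
      exact foldl_op_init min (fun a b c => min_assoc a b c) f cs _ (f c)

theorem pyMaxBy_append (f : (Int × Int × Int × Int) → Int) (l1 l2 : List (Int × Int × Int × Int))
    (h1 : l1 ≠ []) (h2 : l2 ≠ []) :
    pyMaxBy f (l1 ++ l2) = max (pyMaxBy f l1) (pyMaxBy f l2) := by
  cases l1 with
  | nil => exact absurd rfl h1
  | cons b bs =>
    cases l2 with
    | nil => exact absurd rfl h2
    | cons c cs =>
      simp only [pyMaxBy, List.cons_append, List.foldl_append, List.foldl]
      exact foldl_op_init max (fun a b c => max_assoc a b c) f cs _ (f c)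

-- the segment bboxes[lo:hi]
def segOf (bboxes : List (Int × Int × Int × Int)) (lo hi : Nat) : List (Int × Int × Int × Int) :=
  (bboxes.drop lo).take (hi - lo)

theorem segOf_ne_nil (bboxes : List (Int × Int × Int × Int)) (lo hi : Nat)
    (hlt : lo < hi) (hle : hi ≤ bboxes.length) : segOf bboxes lo hi ≠ [] := by
  have : (segOf bboxes lo hi).length = min (hi - lo) (bboxes.length - lo) := by
    simp [segOf]
  intro hnil
  rw [hnil] at this
  simp at this
  omega

theorem segOf_split (bboxes : List (Int × Int × Int × Int)) (lo mid hi : Nat)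
    (h1 : lo ≤ mid) (h2 : mid ≤ hi) :
    segOf bboxes lo hi = segOf bboxes lo mid ++ segOf bboxes mid hi := by
  unfold segOf
  have hsum : hi - lo = (mid - lo) + (hi - mid) := by omega
  have hmid' : lo + (mid - lo) = mid := by omega
  rw [hsum, List.take_add, List.drop_drop, hmid']

-- B's recursion computes clamp-of-extremes on the segment; clamping commutes with min/max by monotonicity (omega).
theorem goB_eq (bboxes : List (Int × Int × Int × Int)) (H W pad : Int) :
    ∀ n lo hi, hi - lo = n → lo < hi → hi ≤ bboxes.length →
      goB bboxes H W pad lo hi =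
        (max 0 (pyMinBy (fun b => b.1) (segOf bboxes lo hi) - pad),
         min H (pyMaxBy (fun b => b.2.1) (segOf bboxes lo hi) + pad),
         max 0 (pyMinBy (fun b => b.2.2.1) (segOf bboxes lo hi) - pad),
         min W (pyMaxBy (fun b => b.2.2.2) (segOf bboxes lo hi) + pad)) := by
  intro n
  induction n using Nat.strong_induction_on with
  | _ n ih =>
    intro lo hi hn hlt hle
    by_cases hone : hi - lo = 1
    · -- leaf: hi = lo + 1
      have hlo : lo < bboxes.length := by omega
      have hseg : segOf bboxes lo hi = [bboxes[lo]] := by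
        unfold segOf
        rw [hone, List.drop_eq_getElem_cons hlo]
        rfl
      rw [goB]
      simp only [hone, hseg, pyMinBy, pyMaxBy, List.foldl, if_true]
      rw [List.getD_eq_getElem _ _ hlo]
    · -- node
      have hnode : lo + 1 < hi := by omega
      rw [goB]
      simp only [hone, if_false, dif_pos hnode]
      set mid := (lo + hi) / 2 with hmid
      have hb1 : lo < mid := by omega
      have hb2 : mid < hi := by omega
      have e1 := ih (mid - lo) (by omega) lo mid rfl hb1 (by omega)
      have e2 := ih (hi - mid) (by omega) mid hi rfl hb2 hle
      rw [e1, e2, segOf_split bboxes lo mid hi (by omega) (by omega)]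
      have n1 := segOf_ne_nil bboxes lo mid hb1 (by omega)
      have n2 := segOf_ne_nil bboxes mid hi hb2 hle
      rw [pyMinBy_append _ _ _ n1 n2, pyMaxBy_append _ _ _ n1 n2,
          pyMinBy_append _ _ _ n1 n2, pyMaxBy_append _ _ _ n1 n2]
      have c1 : ∀ a b : Int, max 0 (min a b - pad) = min (max 0 (a - pad)) (max 0 (b - pad)) := by
        intro a b; omega
      have c2 : ∀ a b K : Int, min K (max a b + pad) = max (min K (a + pad)) (min K (b + pad)) := by
        intro a b K; omega
      simp only [c1, c2]

-- ===== VERDICT (by name: the statement is the Claim_ definition above) =====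
theorem union_many_bboxes_py_spec : Claim_equal_union_many_bboxes_py := by
  intro bboxes H W pad _
  unfold Spec_union_many_bboxes_py union_many_bboxes_py union_many_bboxes_py_alt
  by_cases hnil : bboxes = []
  · simp [hnil]
  · have hlen : 0 < bboxes.length := List.length_pos_iff.mpr hnil
    rw [if_neg hnil, if_neg hnil,
        goB_eq bboxes H W pad bboxes.length 0 bboxes.length rfl hlen le_rfl]
    unfold segOf
    simp
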